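-- pv_equiv track=rewrite | github.com/3hexV/LinkADB | FileTree.py | path2XPathList
-- ===== SOURCE A (Python) =====
-- def path2XPathList(file_path):
--     tmp_list = []
--     sum_path = './'
--     file_path = '.' + file_path
--     for step in file_path.split('/'):
--         if step != '.':
--             sum_path = sum_path + step
--             tmp_list.append(sum_path)
--             sum_path = sum_path + '/'
--     return [tmp_list, tmp_list[len(tmp_list) - 1]]
-- ===== SOURCE B (Python) =====
-- def path2XPathList(file_path):
--     parts = [s for s in ('.' + file_path).split('/') if s != '.']
--     tmp_list = ['./' + '/'.join(parts[:i + 1]) for i in range(len(parts))]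
--     return [tmp_list, tmp_list[-1]]
-- ===== Notes on version B (the rewrite author's own statement) =====
-- stated objective: simpler
-- what changed: Replaces A's single-pass loop that mutates a running sum_path accumulator with an index-then-rebuild decomposition: first filter the tokens once, then build each XPath prefix independently as './' + '/'.join(parts[:i+1]).
import Mathlib
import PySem

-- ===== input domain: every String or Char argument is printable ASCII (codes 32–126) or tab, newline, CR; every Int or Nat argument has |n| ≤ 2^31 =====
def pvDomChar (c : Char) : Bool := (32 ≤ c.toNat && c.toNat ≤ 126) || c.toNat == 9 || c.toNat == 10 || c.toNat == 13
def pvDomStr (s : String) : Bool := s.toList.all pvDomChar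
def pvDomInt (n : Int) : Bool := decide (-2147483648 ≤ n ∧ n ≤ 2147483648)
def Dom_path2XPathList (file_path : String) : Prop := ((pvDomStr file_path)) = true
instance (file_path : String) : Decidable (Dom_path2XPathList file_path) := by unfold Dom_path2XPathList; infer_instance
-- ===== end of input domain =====

-- B replaces A's running sum_path accumulation with an index-then-rebuild decomposition
-- (filter tokens once, then rebuild each prefix independently with join); objective: simpler.

-- ===== PORT A =====
-- A: single loop carrying (tmp_list, sum_path); '.' steps are skipped, others extend sum_path.
def path2XPathList (file_path : String) : List String × String :=
  let fp := "." ++ file_path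
  let st := ((PySem.Str.split? fp "/").getD []).foldl
    (fun (acc : List String × String) step =>
      if step ≠ "." then (acc.1 ++ [acc.2 ++ step], acc.2 ++ step ++ "/") else acc)
    ([], "./")
  -- tmp_list[len(tmp_list) - 1]: IndexError iff tmp_list = [] (excluded by Pre_)
  (st.1, PySem.List.pyGetD st.1 ((st.1.length : Int) - 1) "")

-- ===== PORT B =====
-- B: filter tokens once, then rebuild each prefix independently.
def path2XPathList_alt (file_path : String) : List String × String :=
  let parts := ((PySem.Str.split? ("." ++ file_path) "/").getD []).filter (fun s => s ≠ ".")
  let tmp := (List.range parts.length).map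
    (fun (i : Nat) => "./" ++ PySem.Str.join "/" (PySem.List.slice parts none (some ((i : Int) + 1))))
  -- tmp_list[-1]: IndexError iff tmp = [] (excluded by Pre_)
  (tmp, PySem.List.pyGetD tmp (-1) "")

-- ===== PRECONDITION & SPEC =====
-- Pre_ excludes exactly the paths whose split tokens are all '.', on which both A and B raise IndexError.
def Pre_path2XPathList (file_path : String) : Prop :=
  ((PySem.Str.split? ("." ++ file_path) "/").getD []).any (fun s => s ≠ ".") = true
instance (file_path : String) : Decidable (Pre_path2XPathList file_path) := by
  unfold Pre_path2XPathList; infer_instance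
def pvWitness_path2XPathList : String := "/a/b"
def Spec_path2XPathList (file_path : String) (out : List String × String) : Prop := out = path2XPathList_alt file_path
instance (file_path : String) (out : List String × String) : Decidable (Spec_path2XPathList file_path out) := by unfold Spec_path2XPathList; infer_instance

-- ===== CLAIM (what is proved, stated in full; the proofs are below) =====
def Claim_equal_path2XPathList : Prop := ∀ (file_path : String), Dom_path2XPathList file_path → Pre_path2XPathList file_path → Spec_path2XPathList file_path (path2XPathList file_path)

-- ===== LEMMAS AND PROOFS =====

-- '/'-join of a nonempty cons, at String level
theorem joinS_cons (x : String) (t : List String) (h : t ≠ []) :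
    PySem.Str.join "/" (x :: t) = x ++ "/" ++ PySem.Str.join "/" t := by
  obtain ⟨y, t', rfl⟩ := List.exists_cons_of_ne_nil h
  rw [← String.toList_inj]
  simp [PySem.Str.toList_join, PySem.Chars.join_cons_cons]

theorem joinS_singleton (x : String) : PySem.Str.join "/" [x] = x := by
  rw [← String.toList_inj]
  simp [PySem.Str.toList_join, PySem.Chars.join_singleton]

-- characterisation of A's loop in B's terms
theorem loopA (l : List String) (tmp : List String) (s : String) :
    l.foldl
      (fun (acc : List String × String) step =>
        if step ≠ "." then (acc.1 ++ [acc.2 ++ step], acc.2 ++ step ++ "/") else acc)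
      (tmp, s)
    = (tmp ++ (List.range (l.filter (fun s => s ≠ ".")).length).map
          (fun i => s ++ PySem.Str.join "/" ((l.filter (fun s => s ≠ ".")).take (i + 1))),
       if (l.filter (fun s => s ≠ ".")) = [] then s
       else s ++ PySem.Str.join "/" (l.filter (fun s => s ≠ ".")) ++ "/") := by
  induction l generalizing tmp s with
  | nil => simp
  | cons x l ih =>
    by_cases hx : x = "."
    · subst hx
      rw [List.foldl_cons, if_neg (by simp)]
      have hfx : ("." :: l).filter (fun s => s ≠ ".") = l.filter (fun s => s ≠ ".") := by
        simp
      rw [hfx]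
      exact ih tmp s
    · have hfx : (x :: l).filter (fun s => s ≠ ".") = x :: l.filter (fun s => s ≠ ".") := by
        simp [hx]
      rw [List.foldl_cons, if_pos hx, hfx, ih]
      set m := l.filter (fun s => s ≠ ".") with hm
      refine Prod.ext ?_ ?_
      · -- first components
        dsimp only
        rw [List.append_assoc]
        congr 1
        rw [show (x :: m).length = m.length + 1 from rfl, List.range_succ_eq_map,
            List.map_cons, List.map_map, List.singleton_append]
        congr 1
        · rw [List.take_succ_cons, List.take_zero, joinS_singleton]
        · apply List.map_congr_left
          intro i hi
          simp only [Function.comp_apply, List.mem_range] at hi ⊢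
          have hmne : m ≠ [] := by intro hc; rw [hc] at hi; simp at hi
          have hne : m.take (i + 1) ≠ [] := by
            simp [List.take_eq_nil_iff, hmne]
          rw [show i + 1 + 1 = (i + 1) + 1 from rfl, List.take_succ_cons,
              joinS_cons x _ hne, ← String.append_assoc, ← String.append_assoc]
      · -- second components
        dsimp only
        rw [if_neg (List.cons_ne_nil x m)]
        by_cases hmn : m = []
        · rw [if_pos hmn, hmn, joinS_singleton]
        · rw [if_neg hmn, joinS_cons x m hmn]
          simp [String.append_assoc]

-- B's slice is a take
theorem slice_take (parts : List String) (i : Nat) :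
    PySem.List.slice parts none (some ((i : Int) + 1)) = parts.take (i + 1) := by
  rw [PySem.List.slice_to parts (by positivity), show ((i : Int) + 1).toNat = i + 1 by omega]

theorem path2XPathList_eq (file_path : String)
    (h : Pre_path2XPathList file_path) :
    path2XPathList file_path = path2XPathList_alt file_path := by
  unfold path2XPathList path2XPathList_alt
  dsimp only
  unfold Pre_path2XPathList at h
  set l := (PySem.Str.split? ("." ++ file_path) "/").getD [] with hl
  set m := l.filter (fun s => s ≠ ".") with hm
  have hmne : m ≠ [] := by
    rw [List.any_eq_true] at h
    obtain ⟨x, hx, hxd⟩ := h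
    intro hc
    have : x ∈ m := by rw [hm, List.mem_filter]; exact ⟨hx, hxd⟩
    rw [hc] at this; simp at this
  rw [loopA]
  simp only [List.nil_append]
  set tmp := (List.range m.length).map
      (fun i => "./" ++ PySem.Str.join "/" (m.take (i + 1))) with htmp
  have htmp' : (List.range m.length).map
      (fun (i : Nat) => "./" ++ PySem.Str.join "/" (PySem.List.slice m none (some ((i : Int) + 1)))) = tmp := by
    rw [htmp]; apply List.map_congr_left; intro i _; rw [slice_take]
  rw [htmp']
  have hlen : 1 ≤ tmp.length := by
    rw [htmp]; simp only [List.length_map, List.length_range]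
    exact Nat.one_le_iff_ne_zero.mpr (by simpa [List.length_eq_zero_iff] using hmne)
  have htne : tmp ≠ [] := by
    intro hc; rw [hc] at hlen; simp at hlen
  congr 1
  have hcast : ((tmp.length : Int) - 1) = ((tmp.length - 1 : Nat) : Int) := by
    omega
  rw [hcast, PySem.List.pyGetD_natCast, PySem.List.pyGetD_neg_one tmp "" htne]
  rw [List.getLast_eq_getElem, List.getD_eq_getElem _ _ (by omega)]

-- ===== VERDICT (by name: the statement is the Claim_ definition above) =====
theorem path2XPathList_spec : Claim_equal_path2XPathList := by
  intro fp _ hpre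
  unfold Spec_path2XPathList
  exact path2XPathList_eq fp hpre
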